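-- pv_equiv track=rewrite | github.com/zipbusiness/zippicks-generator | taste_graph/core/taste_engine.py | _get_similar_cuisines
-- ===== SOURCE A (Python) =====
-- from typing import Dict, List, Optional, Tuple, Set
--
-- def _get_similar_cuisines(cuisine: str) -> List[str]:
--     """Get cuisines similar to the given one."""
--     cuisine_groups = {
--         "asian": ["chinese", "japanese", "thai", "vietnamese", "korean"],
--         "european": ["italian", "french", "spanish", "greek", "german"],
--         "latin": ["mexican", "peruvian", "brazilian", "argentinian"],
--         "middle_eastern": ["lebanese", "turkish", "persian", "israeli"]
--     }
--
--     similar = []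
--     for group, members in cuisine_groups.items():
--         if cuisine in members:
--             similar.extend([m for m in members if m != cuisine])
--
--     return similar
-- ===== SOURCE B (Python) =====
-- def _get_similar_cuisines(cuisine: str) -> list:
--     """Get cuisines similar to the given one."""
--     cuisine_groups = {
--         "asian": ["chinese", "japanese", "thai", "vietnamese", "korean"],
--         "european": ["italian", "french", "spanish", "greek", "german"],
--         "latin": ["mexican", "peruvian", "brazilian", "argentinian"],
--         "middle_eastern": ["lebanese", "turkish", "persian", "israeli"]
--     }
--
--     index = {}
--     for group, members in cuisine_groups.items():
--         for i, m in enumerate(members):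
--             index[m] = members[:i] + members[i + 1:]
--
--     return list(index.get(cuisine, []))
-- ===== Notes on version B (the rewrite author's own statement) =====
-- stated objective: idiomatic
-- what changed: Replaces A's scan of all groups with a per-call membership test by building a reverse index dict (cuisine -> other members of its group) in one pass over the groups and returning a fresh copy of index.get(cuisine, []).
import Mathlib
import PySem

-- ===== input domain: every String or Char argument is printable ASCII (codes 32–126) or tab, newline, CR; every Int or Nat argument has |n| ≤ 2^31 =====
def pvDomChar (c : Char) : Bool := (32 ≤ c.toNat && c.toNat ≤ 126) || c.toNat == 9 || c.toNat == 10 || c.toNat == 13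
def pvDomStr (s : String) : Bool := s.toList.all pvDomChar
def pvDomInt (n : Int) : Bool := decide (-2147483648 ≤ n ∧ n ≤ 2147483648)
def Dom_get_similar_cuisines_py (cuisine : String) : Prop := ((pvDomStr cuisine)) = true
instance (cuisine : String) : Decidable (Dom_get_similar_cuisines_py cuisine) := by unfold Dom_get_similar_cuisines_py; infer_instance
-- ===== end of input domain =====

-- B builds a reverse index (cuisine -> other group members) once, then looks the cuisine up; A scans all groups with a membership test.

-- ===== PORT A =====
-- the literal cuisine_groups dict, shared data constant (items in insertion order)
def pvCuisineGroups : List (String × List String) :=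
  [("asian", ["chinese", "japanese", "thai", "vietnamese", "korean"]),
   ("european", ["italian", "french", "spanish", "greek", "german"]),
   ("latin", ["mexican", "peruvian", "brazilian", "argentinian"]),
   ("middle_eastern", ["lebanese", "turkish", "persian", "israeli"])]

def get_similar_cuisines_py (cuisine : String) : List String :=
  -- for group, members in cuisine_groups.items(): if cuisine in members: similar.extend([m for m in members if m != cuisine])
  pvCuisineGroups.foldl
    (fun similar gm =>
      if gm.2.contains cuisine then similar ++ gm.2.filter (fun m => m ≠ cuisine) else similar)
    []

-- ===== PORT B =====
def get_similar_cuisines_py_alt (cuisine : String) : List String :=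
  -- index[m] = members[:i] + members[i+1:]  (i from enumerate, nonnegative, so the slices are exact)
  let index : PySem.Dict String (List String) :=
    pvCuisineGroups.foldl
      (fun d gm =>
        (PySem.List.enumerate gm.2 0).foldl
          (fun d im =>
            d.insert im.2 (PySem.List.slice gm.2 none (some im.1) ++ PySem.List.slice gm.2 (some (im.1 + 1)) none))
          d)
      PySem.Dict.empty
  -- return list(index.get(cuisine, []))
  index.getD cuisine []

-- ===== PRECONDITION & SPEC =====
def Spec_get_similar_cuisines_py (cuisine : String) (out : List String) : Prop := out = get_similar_cuisines_py_alt cuisine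
instance (cuisine : String) (out : List String) : Decidable (Spec_get_similar_cuisines_py cuisine out) := by unfold Spec_get_similar_cuisines_py; infer_instance

-- ===== CLAIM (what is proved, stated in full; the proofs are below) =====
def Claim_equal_get_similar_cuisines_py : Prop := ∀ (cuisine : String), Dom_get_similar_cuisines_py cuisine → Spec_get_similar_cuisines_py cuisine (get_similar_cuisines_py cuisine)

-- ===== LEMMAS AND PROOFS =====
-- B's index fold is a closed term; evaluate it once to a literal dict
theorem pvIndex_eval :
    (pvCuisineGroups.foldl
      (fun d gm =>
        (PySem.List.enumerate gm.2 0).foldl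
          (fun d im =>
            d.insert im.2 (PySem.List.slice gm.2 none (some im.1) ++ PySem.List.slice gm.2 (some (im.1 + 1)) none))
          d)
      PySem.Dict.empty)
    = PySem.Dict.mk
  [("chinese", ["japanese", "thai", "vietnamese", "korean"]),
   ("japanese", ["chinese", "thai", "vietnamese", "korean"]),
   ("thai", ["chinese", "japanese", "vietnamese", "korean"]),
   ("vietnamese", ["chinese", "japanese", "thai", "korean"]),
   ("korean", ["chinese", "japanese", "thai", "vietnamese"]),
   ("italian", ["french", "spanish", "greek", "german"]),
   ("french", ["italian", "spanish", "greek", "german"]),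
   ("spanish", ["italian", "french", "greek", "german"]),
   ("greek", ["italian", "french", "spanish", "german"]),
   ("german", ["italian", "french", "spanish", "greek"]),
   ("mexican", ["peruvian", "brazilian", "argentinian"]),
   ("peruvian", ["mexican", "brazilian", "argentinian"]),
   ("brazilian", ["mexican", "peruvian", "argentinian"]),
   ("argentinian", ["mexican", "peruvian", "brazilian"]),
   ("lebanese", ["turkish", "persian", "israeli"]),
   ("turkish", ["lebanese", "persian", "israeli"]),
   ("persian", ["lebanese", "turkish", "israeli"]),
   ("israeli", ["lebanese", "turkish", "persian"])] := by decide

-- ===== VERDICT (by name: the statement is the Claim_ definition above) =====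
set_option maxRecDepth 20000 in
set_option maxHeartbeats 2000000 in
theorem get_similar_cuisines_py_spec : Claim_equal_get_similar_cuisines_py := by
  intro c _
  unfold Spec_get_similar_cuisines_py get_similar_cuisines_py get_similar_cuisines_py_alt
  rw [pvIndex_eval]
  by_cases h0 : c = "chinese"
  · subst h0; decide
  by_cases h1 : c = "japanese"
  · subst h1; decide
  by_cases h2 : c = "thai"
  · subst h2; decide
  by_cases h3 : c = "vietnamese"
  · subst h3; decide
  by_cases h4 : c = "korean"
  · subst h4; decide
  by_cases h5 : c = "italian"
  · subst h5; decide
  by_cases h6 : c = "french"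
  · subst h6; decide
  by_cases h7 : c = "spanish"
  · subst h7; decide
  by_cases h8 : c = "greek"
  · subst h8; decide
  by_cases h9 : c = "german"
  · subst h9; decide
  by_cases h10 : c = "mexican"
  · subst h10; decide
  by_cases h11 : c = "peruvian"
  · subst h11; decide
  by_cases h12 : c = "brazilian"
  · subst h12; decide
  by_cases h13 : c = "argentinian"
  · subst h13; decide
  by_cases h14 : c = "lebanese"
  · subst h14; decide
  by_cases h15 : c = "turkish"
  · subst h15; decide
  by_cases h16 : c = "persian"
  · subst h16; decide
  by_cases h17 : c = "israeli"
  · subst h17; decide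
  simp [pvCuisineGroups, List.foldl, PySem.Dict.getD, h0, h1, h2, h3, h4, h5, h6, h7, h8, h9, h10, h11, h12, h13, h14, h15, h16, h17, PySem.Dict.get?, Ne.symm h0, Ne.symm h1, Ne.symm h2, Ne.symm h3, Ne.symm h4, Ne.symm h5, Ne.symm h6, Ne.symm h7, Ne.symm h8, Ne.symm h9, Ne.symm h10, Ne.symm h11, Ne.symm h12, Ne.symm h13, Ne.symm h14, Ne.symm h15, Ne.symm h16, Ne.symm h17]
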